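-- pv_equiv track=rewrite | github.com/vexandmore/Whitespace | whitespace/Commands.py | encodeLabel
-- ===== SOURCE A (Python) =====
-- def encodeLabel(n: int) -> str:
--     if n == 0:
--         return " \n"
--
--     out = ""
--     while n > 0:
--         bit = n % 2
--         out += " " if bit == 0 else "\t"
--         n = n // 2
--     out = out[::-1] # reverse string
--     out += "\n"
--     return out
-- ===== SOURCE B (Python) =====
-- def encodeLabel(n: int) -> str:
--     return "".join(" " if d == "0" else "\t" for d in bin(n)[2:]) + "\n"
-- ===== Notes on version B (the rewrite author's own statement) =====
-- stated objective: idiomatic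
-- what changed: B maps the MSB-first digit string bin(n)[2:] in one pass instead of A's LSB-first accumulation loop plus reversal; Pre_ restricts to nonnegative n, the encoding's natural domain (whitespace labels encode nonnegative numbers), where A's loop body never executes and it returns a bare newline.
-- outside the precondition, e.g. on encodeLabel(-3): A returns '\n', B returns '\t\t\t\n'
import Mathlib
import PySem

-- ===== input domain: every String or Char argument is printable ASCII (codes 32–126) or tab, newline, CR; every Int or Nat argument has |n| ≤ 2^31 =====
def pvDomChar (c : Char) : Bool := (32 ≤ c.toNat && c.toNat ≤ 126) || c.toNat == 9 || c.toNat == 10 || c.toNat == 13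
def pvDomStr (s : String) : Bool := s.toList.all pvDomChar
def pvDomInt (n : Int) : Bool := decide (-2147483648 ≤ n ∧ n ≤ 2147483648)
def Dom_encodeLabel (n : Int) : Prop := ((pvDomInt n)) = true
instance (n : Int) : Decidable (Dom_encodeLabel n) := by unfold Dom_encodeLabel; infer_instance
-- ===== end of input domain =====

-- B maps the MSB-first digit string bin(n)[2:] in one pass, instead of A's
-- LSB-first accumulation loop followed by a reversal; same cost, more idiomatic.

-- ===== PORT A =====
-- A's while loop: append " "/"\t" per low bit, halving n; recursion on n.toNat.
def encodeLabelLoopA (n : Int) (out : List Char) : List Char :=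
  if h : n > 0 then
    encodeLabelLoopA (PySem.Int.floordiv n 2)
      (out ++ [if PySem.Int.mod n 2 = 0 then ' ' else '\t'])
  else out
termination_by n.toNat
decreasing_by
  have : PySem.Int.floordiv n 2 = n / 2 := PySem.Int.floordiv_eq_ediv_of_pos (by omega)
  rw [this]; omega

def encodeLabel (n : Int) : String :=
  if n = 0 then " \n"
  else
    -- out = out[::-1] is exactly List.reverse; then out += "\n"
    String.mk ((encodeLabelLoopA n []).reverse ++ ['\n'])

-- ===== PORT B =====
-- bin(n)[2:]: MSB-first binary digits of n; for negative n, bin(n) = "-0b…"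
-- so bin(n)[2:] = 'b' followed by the digits of |n| (exact port of Python's bin).
def binDigitsB (m : Nat) : List Char :=
  if m = 0 then [] else binDigitsB (m / 2) ++ [if m % 2 = 0 then '0' else '1']

def binTail (n : Int) : List Char :=
  if n < 0 then 'b' :: binDigitsB (-n).toNat
  else if n = 0 then ['0'] else binDigitsB n.toNat

def encodeLabel_alt (n : Int) : String :=
  String.mk ((binTail n).map (fun d => if d = '0' then ' ' else '\t') ++ ['\n'])

-- ===== PRECONDITION & SPEC =====
-- Pre_ restricts to nonnegative n, the encoding's natural domain (whitespace labels
-- encode nonnegative numbers); for negative n, A's loop body never executes and it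
-- returns a bare newline.
def Pre_encodeLabel (n : Int) : Prop := 0 ≤ n
instance (n : Int) : Decidable (Pre_encodeLabel n) := by unfold Pre_encodeLabel; infer_instance
def pvWitness_encodeLabel : Int := (5)

def Spec_encodeLabel (n : Int) (out : String) : Prop := out = encodeLabel_alt n
instance (n : Int) (out : String) : Decidable (Spec_encodeLabel n out) := by unfold Spec_encodeLabel; infer_instance

-- ===== CLAIM (what is proved, stated in full; the proofs are below) =====
def Claim_equal_encodeLabel : Prop := ∀ (n : Int), Dom_encodeLabel n → Pre_encodeLabel n → Spec_encodeLabel n (encodeLabel n)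

-- ===== LEMMAS AND PROOFS =====

-- A's loop accumulates LSB-first; reversed, it is B's MSB-first digits mapped to chars.
theorem loopA_eq (m : Nat) (hm : 0 < m) (out : List Char) :
    encodeLabelLoopA (m : Int) out
      = out ++ ((binDigitsB m).map (fun d => if d = '0' then ' ' else '\t')).reverse := by
  induction m using Nat.strong_induction_on generalizing out with
  | _ m ih =>
    rw [encodeLabelLoopA]
    have hpos : (m : Int) > 0 := by exact_mod_cast hm
    rw [dif_pos hpos]
    have hfd : PySem.Int.floordiv (m : Int) 2 = ((m / 2 : Nat) : Int) := by
      exact_mod_cast PySem.Int.floordiv_natCast m 2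
    have hmd : PySem.Int.mod (m : Int) 2 = ((m % 2 : Nat) : Int) := by
      exact_mod_cast PySem.Int.mod_natCast m 2
    rw [hfd, hmd]
    have hbd : binDigitsB m = binDigitsB (m / 2) ++ [if m % 2 = 0 then '0' else '1'] := by
      rw [binDigitsB]; simp [show ¬ m = 0 by omega]
    rw [hbd]
    by_cases h2 : m / 2 = 0
    · rw [h2]
      rw [encodeLabelLoopA, dif_neg (by simp)]
      have hb0 : binDigitsB 0 = [] := by rw [binDigitsB]; simp
      have : (m % 2 : Nat) = 1 := by omega
      simp [hb0, this]
    · rw [ih (m / 2) (by omega) (by omega)]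
      rcases Nat.even_or_odd m with he | ho
      · have : m % 2 = 0 := Nat.even_iff.mp he
        simp [this]
      · have : m % 2 = 1 := Nat.odd_iff.mp ho
        simp [this]

-- ===== VERDICT (by name: the statement is the Claim_ definition above) =====
theorem encodeLabel_spec : Claim_equal_encodeLabel := by
  intro n _ hpre
  unfold Spec_encodeLabel encodeLabel encodeLabel_alt binTail
  rcases eq_or_lt_of_le hpre with heq | hgt
  · subst heq; decide
  · rw [if_neg (by omega)]
    have hn : n = ((n.toNat : Nat) : Int) := by omega
    have := loopA_eq n.toNat (by omega) []
    rw [← hn] at this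
    rw [this]
    simp [if_neg (by omega : ¬ n < 0), if_neg (by omega : ¬ n = 0)]
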